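-- pv_equiv track=rewrite | github.com/skolakoda/ucimo-algoritme | 60-nizovi/napredno/najskuplja-kupovina.py | choose_best_buy
-- ===== SOURCE A (Python) =====
-- import itertools
--
-- def choose_best_buy(limit, n, prices):
--     best_buy = 0
--     combinations = itertools.combinations(prices, n)
--     for combination in combinations:
--         total = sum(combination)
--         if total <= limit and total > best_buy:
--              best_buy = total
--     return best_buy if best_buy else None
-- ===== SOURCE B (Python) =====
-- def choose_best_buy(limit, n, prices):
--     # Bounded subset-sum DP over achievable sums per item count,
--     # instead of enumerating all C(len(prices), n) combinations.
--     if n > len(prices):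
--         return None
--     sums = [set() for _ in range(n + 1)]
--     sums[0].add(0)
--     for p in prices:
--         for k in range(n, 0, -1):
--             sums[k] |= {s + p for s in sums[k - 1]}
--     return max((s for s in sums[n] if 0 < s <= limit), default=None)
-- ===== Notes on version B (the rewrite author's own statement) =====
-- stated objective: alternative
-- what changed: Replaces enumeration of all n-element combinations with a bounded subset-sum dynamic program that keeps, per item count k, the set of achievable sums, then takes the max achievable n-item sum in (0, limit].
-- outside the precondition, e.g. on choose_best_buy(10, -1, [3, 5]): A raises ValueError, B raises IndexError
import Mathlib
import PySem

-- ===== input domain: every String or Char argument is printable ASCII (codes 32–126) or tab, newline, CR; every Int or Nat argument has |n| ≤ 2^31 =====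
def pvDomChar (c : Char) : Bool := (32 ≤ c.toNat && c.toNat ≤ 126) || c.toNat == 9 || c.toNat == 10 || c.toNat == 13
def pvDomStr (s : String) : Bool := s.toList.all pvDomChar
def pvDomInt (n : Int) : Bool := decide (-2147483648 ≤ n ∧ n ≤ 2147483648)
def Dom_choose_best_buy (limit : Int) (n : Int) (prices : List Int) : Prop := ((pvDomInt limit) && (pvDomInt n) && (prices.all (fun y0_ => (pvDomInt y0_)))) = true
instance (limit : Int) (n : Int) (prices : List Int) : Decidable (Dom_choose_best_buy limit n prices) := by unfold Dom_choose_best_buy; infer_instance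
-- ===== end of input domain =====

-- B replaces the enumeration of all C(len,n) combinations by a bounded subset-sum DP
-- (per item count k, the set of achievable sums); same return value, different algorithm.

-- ===== PORT A =====
-- itertools.combinations(prices, n): the n-element subsequences.
def pvCombos (k : Nat) (l : List Int) : List (List Int) :=
  match k, l with
  | 0, _ => [[]]
  | _ + 1, [] => []
  | k + 1, x :: xs => (pvCombos k xs).map (fun c => x :: c) ++ pvCombos (k + 1) xs

def choose_best_buy (limit : Int) (n : Int) (prices : List Int) : Option Int :=
  let best := (pvCombos n.toNat prices).foldl
    (fun b c => if c.sum ≤ limit ∧ c.sum > b then c.sum else b) 0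
  if best ≠ 0 then some best else none

-- ===== PORT B =====
-- one item p of Source B's outer loop: 'for k in range(n, 0, -1): sums[k] |= {s + p for s in sums[k-1]}'
-- (the k-loop runs downward, so new entry k+1 is old entry k+1 unioned with the shifted
-- old entry k — realised as a zipWith of the tail with the list itself)
def pvStep (p : Int) (sums : List (PySem.Set Int)) : List (PySem.Set Int) :=
  match sums with
  | [] => []
  | s0 :: rest =>
      s0 :: List.zipWith (fun cur prev => PySem.Set.update cur (prev.map (fun s => s + p)))
              rest (s0 :: rest)

def choose_best_buy_alt (limit : Int) (n : Int) (prices : List Int) : Option Int :=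
  if n > (prices.length : Int) then none
  else
    let sums := prices.foldl (fun acc p => pvStep p acc)
      (PySem.Set.ofList [0] :: List.replicate n.toNat PySem.Set.empty)
    PySem.List.max?
      ((sums.getLastD PySem.Set.empty).filter (fun s => decide (0 < s) && decide (s ≤ limit)))
      (fun y => y)

-- ===== PRECONDITION & SPEC =====
-- Pre_ excludes n < 0, where A raises ValueError (itertools.combinations rejects negative r).
def Pre_choose_best_buy (limit : Int) (n : Int) (prices : List Int) : Prop := 0 ≤ n
instance (limit : Int) (n : Int) (prices : List Int) : Decidable (Pre_choose_best_buy limit n prices) := by unfold Pre_choose_best_buy; infer_instance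
def pvWitness_choose_best_buy : Int × Int × List Int := (10, 2, [3, 8, 5])
def Spec_choose_best_buy (limit : Int) (n : Int) (prices : List Int) (out : Option Int) : Prop := out = choose_best_buy_alt limit n prices
instance (limit : Int) (n : Int) (prices : List Int) (out : Option Int) : Decidable (Spec_choose_best_buy limit n prices out) := by unfold Spec_choose_best_buy; infer_instance

-- ===== CLAIM (what is proved, stated in full; the proofs are below) =====
def Claim_equal_choose_best_buy : Prop := ∀ (limit : Int) (n : Int) (prices : List Int), Dom_choose_best_buy limit n prices → Pre_choose_best_buy limit n prices → Spec_choose_best_buy limit n prices (choose_best_buy limit n prices)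

-- ===== LEMMAS AND PROOFS =====

-- membership in A's combination list = sublists of the given length
lemma mem_pvCombos : ∀ (l : List Int) (k : Nat) (c : List Int),
    c ∈ pvCombos k l ↔ c.Sublist l ∧ c.length = k := by
  intro l
  induction l with
  | nil =>
      intro k c
      cases k with
      | zero => simp [pvCombos, List.sublist_nil, List.length_eq_zero_iff]
      | succ k =>
          simp only [pvCombos, List.not_mem_nil, false_iff]
          rintro ⟨hs, hl⟩
          rw [List.sublist_nil] at hs
          subst hs
          simp at hl
  | cons x xs ih =>
      intro k c
      cases k with
      | zero =>
          simp only [pvCombos, List.mem_singleton]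
          constructor
          · rintro rfl; exact ⟨List.nil_sublist _, rfl⟩
          · rintro ⟨_, hl⟩; exact List.length_eq_zero_iff.mp hl
      | succ k =>
          simp only [pvCombos, List.mem_append, List.mem_map, ih]
          constructor
          · rintro (⟨c', ⟨hs, hl⟩, rfl⟩ | ⟨hs, hl⟩)
            · exact ⟨List.cons_sublist_cons.mpr hs, by simp [hl]⟩
            · exact ⟨hs.cons _, hl⟩
          · rintro ⟨hs, hl⟩
            rcases List.sublist_cons_iff.mp hs with h | ⟨r, rfl, hr⟩
            · exact Or.inr ⟨h, hl⟩
            · exact Or.inl ⟨r, ⟨hr, by simpa using hl⟩, rfl⟩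

lemma pvCombos_eq_nil {k : Nat} {l : List Int} (h : l.length < k) : pvCombos k l = [] := by
  rw [List.eq_nil_iff_forall_not_mem]
  intro c hc
  rw [mem_pvCombos] at hc
  have := hc.1.length_le
  omega

-- A's accumulator loop is a running max over the sums that pass the limit test
lemma foldA_eq_foldl_max (limit : Int) (L : List (List Int)) (b : Int) :
    L.foldl (fun b c => if c.sum ≤ limit ∧ c.sum > b then c.sum else b) b
      = ((L.map List.sum).filter (fun t => decide (t ≤ limit))).foldl max b := by
  rw [List.foldl_filter, List.foldl_map]
  have hf : (fun (b : Int) (c : List Int) => if c.sum ≤ limit ∧ c.sum > b then c.sum else b)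
      = fun (b : Int) (c : List Int) => if decide (c.sum ≤ limit) = true then max b c.sum else b := by
    funext b c
    by_cases h : c.sum ≤ limit
    · simp only [h, decide_true, if_true, true_and, gt_iff_lt]
      rcases le_or_gt c.sum b with h2 | h2
      · rw [if_neg (by omega), max_eq_left h2]
      · rw [if_pos h2, max_eq_right (le_of_lt h2)]
    · simp only [h, decide_false, Bool.false_eq_true, if_false, false_and]
  rw [hf]

-- length of the DP state is preserved by one item step
lemma length_pvStep (p : Int) (sums : List (PySem.Set Int)) :
    (pvStep p sums).length = sums.length := by
  cases sums with
  | nil => rfl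
  | cons s0 rest => simp [pvStep]

-- membership in the DP state after one item step
lemma mem_getD_pvStep (p : Int) (sums : List (PySem.Set Int)) (i : Nat) (s : Int) :
    s ∈ (pvStep p sums).getD i PySem.Set.empty ↔
      (s ∈ sums.getD i PySem.Set.empty ∨
       (1 ≤ i ∧ i < sums.length ∧ ∃ t ∈ sums.getD (i - 1) PySem.Set.empty, s = t + p)) := by
  cases sums with
  | nil => simp [pvStep, PySem.Set.empty]
  | cons s0 rest =>
      cases i with
      | zero => simp [pvStep]
      | succ j =>
          simp only [pvStep, List.getD_cons_succ, Nat.add_sub_cancel]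
          rw [List.getD_eq_getElem?_getD, List.getD_eq_getElem?_getD,
              List.getElem?_zipWith']
          by_cases hj : j < rest.length
          · have h1 : rest[j]? = some (rest[j]'hj) := List.getElem?_eq_getElem hj
            have h2 : (s0 :: rest)[j]? = some ((s0 :: rest)[j]'(by simp; omega)) :=
              List.getElem?_eq_getElem (by simp; omega)
            rw [h1, h2]
            simp only [Option.map_some, Option.bind_some, Option.getD_some,
              PySem.Set.mem_update, List.mem_map, List.length_cons]
            have hget : (s0 :: rest).getD j PySem.Set.empty = (s0 :: rest)[j]'(by simp; omega) := by
              rw [List.getD_eq_getElem?_getD, h2]; rfl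
            rw [hget]
            constructor
            · rintro (h | ⟨t, ht, rfl⟩)
              · exact Or.inl h
              · exact Or.inr ⟨by omega, by omega, t, ht, rfl⟩
            · rintro (h | ⟨_, _, t, ht, rfl⟩)
              · exact Or.inl h
              · exact Or.inr ⟨t, ht, rfl⟩
          · have h1 : rest[j]? = none := by
              rw [List.getElem?_eq_none_iff]; omega
            rw [h1]
            simp only [Option.map_none, List.length_cons]
            constructor
            · intro h
              exact absurd h (by simp [Option.bind, PySem.Set.empty])
            · rintro (h | ⟨-, hlt, -⟩)
              · exact absurd h (by simp [PySem.Set.empty])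
              · omega

-- the DP invariant: entry i holds exactly the sums of the i-element sublists
lemma dp_invariant (n : Nat) (l : List Int) :
    ((l.foldl (fun acc p => pvStep p acc)
        (PySem.Set.ofList [0] :: List.replicate n PySem.Set.empty)).length = n + 1) ∧
    (∀ (i : Nat) (s : Int),
      s ∈ (l.foldl (fun acc p => pvStep p acc)
            (PySem.Set.ofList [0] :: List.replicate n PySem.Set.empty)).getD i PySem.Set.empty
        ↔ (i ≤ n ∧ ∃ c : List Int, c.Sublist l ∧ c.length = i ∧ c.sum = s)) := by
  induction l using List.reverseRecOn with
  | nil =>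
      refine ⟨by simp, ?_⟩
      intro i s
      cases i with
      | zero =>
          simp only [List.foldl_nil, List.getD_cons_zero, List.sublist_nil]
          constructor
          · intro h
            have : s ∈ ([0] : List Int) := (PySem.Set.mem_ofList _ _).mp h
            simp at this
            exact ⟨Nat.zero_le _, [], by simp [this]⟩
          · rintro ⟨-, c, rfl, -, rfl⟩
            exact (PySem.Set.mem_ofList _ _).mpr (by simp)
      | succ j =>
          simp only [List.foldl_nil, List.getD_cons_succ, List.sublist_nil]
          rw [List.getD_eq_getElem?_getD, List.getElem?_replicate]
          constructor
          · intro h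
            split at h <;> exact absurd h (by simp [PySem.Set.empty])
          · rintro ⟨-, c, rfl, hlen, -⟩
            simp at hlen
  | append_singleton l p ih =>
      obtain ⟨ihlen, ihmem⟩ := ih
      rw [List.foldl_append, List.foldl_cons, List.foldl_nil]
      refine ⟨by rw [length_pvStep, ihlen], ?_⟩
      intro i s
      rw [mem_getD_pvStep, ihlen]
      simp only [ihmem]
      constructor
      · rintro (⟨hi, c, hc, hlen, hsum⟩ | ⟨hi1, hilt, t, ⟨hi2, c, hc, hlen, hsum⟩, rfl⟩)
        · exact ⟨hi, c, hc.trans (List.sublist_append_left l [p]), hlen, hsum⟩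
        · refine ⟨by omega, c ++ [p], hc.append (List.Sublist.refl [p]), by simp [hlen]; omega,
            by simp [hsum]⟩
      · rintro ⟨hi, c, hc, hlen, hsum⟩
        rcases List.sublist_append_iff.mp hc with ⟨c1, c2, rfl, hc1, hc2⟩
        rcases List.sublist_singleton.mp hc2 with rfl | rfl
        · exact Or.inl ⟨hi, c1, by simpa using hc1, by simpa using hlen, by simpa using hsum⟩
        · refine Or.inr ⟨by simp at hlen; omega, by omega, c1.sum, ⟨by simp at hlen; omega, c1,
            hc1, by simp at hlen; omega, rfl⟩, by simp at hsum; omega⟩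

-- ===== VERDICT (by name: the statement is the Claim_ definition above) =====
theorem choose_best_buy_spec : Claim_equal_choose_best_buy := by
  intro limit n prices _ hPre
  unfold Spec_choose_best_buy
  simp only [choose_best_buy, choose_best_buy_alt]
  by_cases hbig : n > (prices.length : Int)
  · rw [if_pos hbig]
    have hk : prices.length < n.toNat := by omega
    simp [pvCombos_eq_nil hk]
  · rw [if_neg hbig]
    set k := n.toNat with hkdef
    obtain ⟨hlen, hmem⟩ := dp_invariant k prices
    set sums := prices.foldl (fun acc p => pvStep p acc)
      (PySem.Set.ofList [0] :: List.replicate k PySem.Set.empty) with hsums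
    have hlast : sums.getLastD PySem.Set.empty = sums.getD k PySem.Set.empty := by
      rw [List.getLastD_eq_getLast?, List.getLast?_eq_getElem?, List.getD_eq_getElem?_getD, hlen]
      simp
    rw [foldA_eq_foldl_max]
    set F := (((pvCombos k prices).map List.sum).filter (fun t => decide (t ≤ limit))) with hF
    set m := F.foldl max 0 with hm
    have hmaxF : PySem.List.max? (0 :: F) (fun y => y) = some m := by
      rw [hm]; exact PySem.List.max?_id_cons 0 F
    have hmmem : m ∈ (0 :: F) := PySem.List.max?_mem hmaxF
    have hmmax : ∀ y ∈ (0 :: F), y ≤ m := fun y hy => PySem.List.max?_isMax hmaxF y hy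
    have hm0 : (0 : Int) ≤ m := hmmax 0 (List.mem_cons_self)
    have hmemF : ∀ t : Int,
        t ∈ F ↔ ((∃ c : List Int, c.Sublist prices ∧ c.length = k ∧ c.sum = t) ∧ t ≤ limit) := by
      intro t
      rw [hF]
      simp only [List.mem_filter, List.mem_map, mem_pvCombos, decide_eq_true_eq]
      constructor
      · rintro ⟨⟨c, ⟨hc, hlc⟩, rfl⟩, h⟩
        exact ⟨⟨c, hc, hlc, rfl⟩, h⟩
      · rintro ⟨⟨c, hc, hlc, rfl⟩, h⟩
        exact ⟨⟨c, ⟨hc, hlc⟩, rfl⟩, h⟩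
    have hbridge : ∀ t : Int,
        (t ∈ (sums.getLastD PySem.Set.empty).filter
              (fun s => decide (0 < s) && decide (s ≤ limit))) ↔ (t ∈ F ∧ 0 < t) := by
      intro t
      rw [hlast]
      simp only [List.mem_filter, Bool.and_eq_true, decide_eq_true_eq, hmem, hmemF]
      constructor
      · rintro ⟨⟨-, hex⟩, h0, hl⟩
        exact ⟨⟨hex, hl⟩, h0⟩
      · rintro ⟨⟨hex, hl⟩, h0⟩
        exact ⟨⟨le_refl k, hex⟩, h0, hl⟩
    cases hC : PySem.List.max? ((sums.getLastD PySem.Set.empty).filter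
        (fun s => decide (0 < s) && decide (s ≤ limit))) (fun y => y) with
    | none =>
        have hCnil := (PySem.List.max?_eq_none_iff _ _).mp hC
        have hmz : m = 0 := by
          by_contra hne
          have hmF : m ∈ F := by
            rcases List.mem_cons.mp hmmem with h | h
            · exact absurd h hne
            · exact h
          have := (hbridge m).mpr ⟨hmF, by omega⟩
          rw [hCnil] at this
          simp at this
        simp [hmz]
    | some v =>
        have hvmem := PySem.List.max?_mem hC
        obtain ⟨hvF, hv0⟩ := (hbridge v).mp hvmem
        have hvm : v ≤ m := hmmax v (List.mem_cons_of_mem _ hvF)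
        have hmne : m ≠ 0 := by omega
        have hmF : m ∈ F := by
          rcases List.mem_cons.mp hmmem with h | h
          · exact absurd h hmne
          · exact h
        have hmv : m ≤ v := PySem.List.max?_isMax hC m ((hbridge m).mpr ⟨hmF, by omega⟩)
        rw [if_pos hmne]
        have : m = v := le_antisymm hmv hvm
        rw [this]
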